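-- pv_equiv track=rewrite | github.com/vladluca70/NumSeq--Python-Library | build/lib/numseq/core.py | tribonacci_numbers_up_to
-- ===== SOURCE A (Python) =====
-- def tribonacci_numbers_up_to(n):
--     if n < 0:
--         raise ValueError("the number must be positive")
--     if n == 0:
--         raise ValueError("the number must be greater than 0")
--
--     trib_nbrs = [0, 1, 1]  # T(0)=0, T(1)=1, T(2)=1
--     i = 3
--     while True:
--         new_number = trib_nbrs[i-1] + trib_nbrs[i-2] + trib_nbrs[i-3]
--         if new_number <= n:
--             trib_nbrs.append(new_number)
--             i += 1
--         else:
--             break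
--     return trib_nbrs
-- ===== SOURCE B (Python) =====
-- def tribonacci_numbers_up_to(n):
--     if n < 0:
--         raise ValueError("the number must be positive")
--     if n == 0:
--         raise ValueError("the number must be greater than 0")
--
--     # Uses the doubling identity T(k) = 2*T(k-1) - T(k-4) (valid since
--     # T(k-1) = T(k-2)+T(k-3)+T(k-4)), so no three-term sum is ever formed.
--     def rest(w, x, y, z):
--         # w,x,y,z are the last four tribonacci numbers emitted, z <= n
--         nxt = 2 * z - w
--         if nxt > n:
--             return []
--         return [nxt] + rest(x, y, z, nxt)
--
--     if n == 1:
--         return [0, 1, 1]  # T(3) = 2 already exceeds n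
--     return [0, 1, 1, 2] + rest(0, 1, 1, 2)
-- ===== Notes on version B (the rewrite author's own statement) =====
-- stated objective: alternative
-- what changed: B replaces A's iterative list-indexed three-term sum T(k)=T(k-1)+T(k-2)+T(k-3) with a recursive build using the doubling identity T(k)=2*T(k-1)-T(k-4), carrying four rolling scalars and no list indexing.
-- outside the precondition, e.g. on tribonacci_numbers_up_to(0): A raises ValueError, B raises ValueError; on tribonacci_numbers_up_to(-3): A raises ValueError, B raises ValueError
import Mathlib
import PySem

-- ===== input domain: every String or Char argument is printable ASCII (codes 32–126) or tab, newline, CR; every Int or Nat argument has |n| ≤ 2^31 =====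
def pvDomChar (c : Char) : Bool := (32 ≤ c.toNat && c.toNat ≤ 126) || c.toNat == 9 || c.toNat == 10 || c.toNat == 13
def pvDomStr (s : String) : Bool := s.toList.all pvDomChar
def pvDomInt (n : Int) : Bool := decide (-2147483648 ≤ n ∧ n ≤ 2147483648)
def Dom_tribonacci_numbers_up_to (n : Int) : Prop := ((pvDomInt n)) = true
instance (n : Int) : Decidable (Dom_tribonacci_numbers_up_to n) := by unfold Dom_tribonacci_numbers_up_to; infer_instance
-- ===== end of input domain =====

-- B replaces A's list-indexed three-term recurrence by a recursion on four rolling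
-- scalars using the doubling identity T(k) = 2*T(k-1) - T(k-4); equal on all n ≥ 1.

-- ===== PORT A =====
-- A's while-True loop: the list grows and is indexed at i-1, i-2, i-3; the fuel
-- n.toNat+1 is a totality guard only (each appended value exceeds the previous one,
-- so the loop always breaks within that many steps).
def tribLoopA (n : Int) : Nat → List Int → List Int
  | 0, lst => lst
  | f+1, lst =>
    let i := lst.length
    let new_number := lst.getD (i-1) 0 + lst.getD (i-2) 0 + lst.getD (i-3) 0
    if new_number ≤ n then tribLoopA n f (lst ++ [new_number]) else lst

def tribonacci_numbers_up_to (n : Int) : List Int :=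
  tribLoopA n (n.toNat + 1) [0, 1, 1]

-- ===== PORT B =====
-- B's recursive helper 'rest' on four rolling scalars, next value 2*z - w;
-- the fuel n.toNat+1 is a totality guard only (each emitted value exceeds
-- the previous one by at least 2, so the recursion stops within the fuel).
def tribRest (n : Int) : Nat → Int → Int → Int → Int → List Int
  | 0, _, _, _, _ => []
  | f+1, w, x, y, z =>
    let nxt := 2 * z - w
    if n < nxt then [] else nxt :: tribRest n f x y z nxt

def tribonacci_numbers_up_to_alt (n : Int) : List Int :=
  if n = 1 then [0, 1, 1]
  else [0, 1, 1, 2] ++ tribRest n (n.toNat + 1) 0 1 1 2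

-- ===== PRECONDITION & SPEC =====
-- A raises ValueError for n < 0 and for n == 0; Pre_ admits exactly the rest.
def Pre_tribonacci_numbers_up_to (n : Int) : Prop := 1 ≤ n
instance (n : Int) : Decidable (Pre_tribonacci_numbers_up_to n) := by unfold Pre_tribonacci_numbers_up_to; infer_instance
def pvWitness_tribonacci_numbers_up_to : Int := 7

def Spec_tribonacci_numbers_up_to (n : Int) (out : List Int) : Prop := out = tribonacci_numbers_up_to_alt n
instance (n : Int) (out : List Int) : Decidable (Spec_tribonacci_numbers_up_to n out) := by unfold Spec_tribonacci_numbers_up_to; infer_instance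

-- ===== CLAIM (what is proved, stated in full; the proofs are below) =====
def Claim_equal_tribonacci_numbers_up_to : Prop := ∀ (n : Int), Dom_tribonacci_numbers_up_to n → Pre_tribonacci_numbers_up_to n → Spec_tribonacci_numbers_up_to n (tribonacci_numbers_up_to n)

-- ===== LEMMAS AND PROOFS =====

theorem getD_last4 (pre : List Int) (w x y z : Int) :
    (pre ++ [w, x, y, z]).getD (pre.length + 3) 0 = z ∧
    (pre ++ [w, x, y, z]).getD (pre.length + 2) 0 = y ∧
    (pre ++ [w, x, y, z]).getD (pre.length + 1) 0 = x := by
  refine ⟨?_, ?_, ?_⟩ <;> simp [List.getD]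

-- A's loop on a list ending with four values w,x,y,z satisfying the tribonacci
-- invariant z = w + x + y appends exactly the values B's 'rest' emits.
theorem tribLoopA_eq_tribRest (n : Int) (f : Nat) :
    ∀ (pre : List Int) (w x y z : Int), z = w + x + y →
      tribLoopA n f (pre ++ [w, x, y, z]) =
        (pre ++ [w, x, y, z]) ++ tribRest n f w x y z := by
  induction f with
  | zero => intro pre w x y z _; simp [tribLoopA, tribRest]
  | succ f ih =>
    intro pre w x y z hz
    obtain ⟨h3, h2, h1⟩ := getD_last4 pre w x y z
    show (let i := (pre ++ [w, x, y, z]).length;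
      let new_number := (pre ++ [w,x,y,z]).getD (i-1) 0 + (pre ++ [w,x,y,z]).getD (i-2) 0 + (pre ++ [w,x,y,z]).getD (i-3) 0;
      if new_number ≤ n then tribLoopA n f ((pre ++ [w,x,y,z]) ++ [new_number]) else (pre ++ [w,x,y,z])) = _
    have hlen : (pre ++ [w, x, y, z]).length = pre.length + 4 := by simp
    simp only [hlen]
    have e1 : pre.length + 4 - 1 = pre.length + 3 := by omega
    have e2 : pre.length + 4 - 2 = pre.length + 2 := by omega
    have e3 : pre.length + 4 - 3 = pre.length + 1 := by omega
    simp only [e1, e2, e3, h3, h2, h1, tribRest]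
    have hval : z + y + x = 2 * z - w := by omega
    by_cases hle : z + y + x ≤ n
    · rw [if_pos hle]
      have hnlt : ¬ (n < 2 * z - w) := by omega
      rw [if_neg hnlt]
      have hsplit : (pre ++ [w, x, y, z]) ++ [z + y + x] = (pre ++ [w]) ++ [x, y, z, z + y + x] := by
        simp
      rw [hsplit, ih (pre ++ [w]) x y z (z + y + x) (by omega)]
      simp [hval]
    · rw [if_neg hle]
      have hlt : n < 2 * z - w := by omega
      simp [if_pos hlt]

-- B's recursion does not depend on the fuel once the fuel exceeds n - z,
-- because each emitted value grows by at least 2 (invariant z = w+x+y, 1 ≤ x, 1 ≤ y, 0 ≤ w).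
theorem tribRest_fuel (n : Int) :
    ∀ (f g : Nat) (w x y z : Int), 0 ≤ w → 1 ≤ x → 1 ≤ y → z = w + x + y →
      (n - z).toNat < f → (n - z).toNat < g →
      tribRest n f w x y z = tribRest n g w x y z := by
  intro f
  induction f with
  | zero => intro g w x y z _ _ _ _ hf _; omega
  | succ f ih =>
    intro g w x y z hw hx hy hz hf hg
    cases g with
    | zero => omega
    | succ g =>
      simp only [tribRest]
      by_cases hlt : n < 2 * z - w
      · simp [hlt]
      · rw [if_neg hlt, if_neg hlt]
        have := ih g x y z (2 * z - w) (by omega) (by omega) (by omega) (by omega)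
          (by omega) (by omega)
        rw [this]

-- ===== VERDICT (by name: the statement is the Claim_ definition above) =====
theorem tribonacci_numbers_up_to_spec : Claim_equal_tribonacci_numbers_up_to := by
  intro n _ hn
  unfold Spec_tribonacci_numbers_up_to tribonacci_numbers_up_to tribonacci_numbers_up_to_alt
  have h1 : (1 : Int) ≤ n := hn
  -- unfold the first iteration of A's loop on [0, 1, 1]
  have hfuel : n.toNat + 1 = n.toNat + 1 := rfl
  show tribLoopA n (n.toNat + 1) [0, 1, 1] = _
  rw [show (n.toNat + 1) = Nat.succ n.toNat from rfl]
  simp only [tribLoopA, List.length_cons, List.length_nil, List.getD]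
  norm_num
  by_cases h2 : (2 : Int) ≤ n
  · rw [if_pos h2]
    have hne : ¬ (n = 1) := by omega
    rw [if_neg hne]
    have := tribLoopA_eq_tribRest n n.toNat [] 0 1 1 2 (by norm_num)
    simp only [List.nil_append] at this
    rw [this]
    have hfe := tribRest_fuel n n.toNat (n.toNat + 1) 0 1 1 2 (by norm_num) le_rfl le_rfl
      (by norm_num) (by omega) (by omega)
    rw [hfe]
    rfl
  · rw [if_neg h2]
    have : n = 1 := by omega
    simp [this]
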